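-- pv_equiv track=rewrite | github.com/jsonwulff/skills | plugins/self-improvement/skills/self-reflect/hooks/capture-signals.py | _detect_search_thrashing
-- ===== SOURCE A (Python) =====
-- def _detect_search_thrashing(transcript):
--     """Detect 3+ Glob/Grep with empty results before finding target."""
--     empty_searches = 0
--     for entry in transcript:
--         tool = entry.get("tool_use", {})
--         if isinstance(tool, dict):
--             name = tool.get("name", "")
--             if name in ("Glob", "Grep"):
--                 result = tool.get("result", "")
--                 if not result or result.strip() == "[]" or "No matches" in str(result):
--                     empty_searches += 1
--                 else:
--                     if empty_searches >= 3:
--                         return True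
--                     empty_searches = 0
--             else:
--                 if empty_searches >= 3:
--                     return True
--                 empty_searches = 0
--     return empty_searches >= 3
-- ===== SOURCE B (Python) =====
-- def _detect_search_thrashing(transcript):
--     """Detect 3+ Glob/Grep with empty results before finding target."""
--     flags = []
--     for entry in transcript:
--         tool = entry.get("tool_use", {})
--         if isinstance(tool, dict):
--             name = tool.get("name", "")
--             if name in ("Glob", "Grep"):
--                 result = tool.get("result", "")
--                 flags.append(
--                     not result
--                     or result.strip() == "[]"
--                     or "No matches" in str(result)
--                 )
--             else:
--                 flags.append(False)
--     return any(a and b and c for a, b, c in zip(flags, flags[1:], flags[2:]))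
-- ===== Notes on version B (the rewrite author's own statement) =====
-- stated objective: alternative
-- what changed: Replaces A's stateful scan (running empty-search counter with early return and resets) by a two-phase decomposition: classify every entry into a boolean flag, then detect three consecutive True flags with a sliding window over zip(flags, flags[1:], flags[2:]).
import Mathlib
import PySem

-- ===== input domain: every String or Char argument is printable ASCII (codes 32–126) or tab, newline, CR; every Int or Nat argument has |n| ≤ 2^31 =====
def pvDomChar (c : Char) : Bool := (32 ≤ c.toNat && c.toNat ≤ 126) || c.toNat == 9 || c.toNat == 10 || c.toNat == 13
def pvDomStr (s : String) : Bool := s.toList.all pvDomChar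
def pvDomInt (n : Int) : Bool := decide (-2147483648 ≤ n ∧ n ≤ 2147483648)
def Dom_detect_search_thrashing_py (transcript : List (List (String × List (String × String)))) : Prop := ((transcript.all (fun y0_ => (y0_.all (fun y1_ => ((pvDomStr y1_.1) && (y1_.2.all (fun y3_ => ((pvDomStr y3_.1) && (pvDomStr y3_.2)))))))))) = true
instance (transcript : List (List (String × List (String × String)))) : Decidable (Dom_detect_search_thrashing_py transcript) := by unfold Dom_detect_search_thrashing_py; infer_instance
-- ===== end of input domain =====

-- B replaces A's running counter with early return by classify-each-entry-then-scan-windows-of-three (alternative decomposition, same cost).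

-- ===== PORT A =====
-- the empty-result test of the Python line
-- `not result or result.strip() == "[]" or "No matches" in str(result)` (result is a str here, so str(result) = result)
def pvEmptyRes (result : String) : Bool :=
  result == "" || PySem.Str.strip result == "[]" || PySem.Str.isIn "No matches" result

-- the for-loop of A with its running counter `empty_searches` and early `return True`
def pvDetectLoopA (entries : List (List (String × List (String × String)))) (empty_searches : Int) : Bool :=
  match entries with
  | [] => decide (empty_searches ≥ 3)
  | entry :: rest =>
    let tool := PySem.Dict.getD (PySem.Dict.mk entry) "tool_use" []
    -- `isinstance(tool, dict)` is always true under the type convention (values of entry are dicts)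
    let name := PySem.Dict.getD (PySem.Dict.mk tool) "name" ""
    if name == "Glob" || name == "Grep" then
      let result := PySem.Dict.getD (PySem.Dict.mk tool) "result" ""
      if pvEmptyRes result then
        pvDetectLoopA rest (empty_searches + 1)
      else if empty_searches ≥ 3 then true
      else pvDetectLoopA rest 0
    else if empty_searches ≥ 3 then true
    else pvDetectLoopA rest 0

def detect_search_thrashing_py (transcript : List (List (String × List (String × String)))) : Bool :=
  pvDetectLoopA transcript 0

-- ===== PORT B =====
-- B's classifier: the flag appended for one entry (same Python expressions as A's tests)
def pvFlag (entry : List (String × List (String × String))) : Bool :=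
  let tool := PySem.Dict.getD (PySem.Dict.mk entry) "tool_use" []
  let name := PySem.Dict.getD (PySem.Dict.mk tool) "name" ""
  if name == "Glob" || name == "Grep" then
    let result := PySem.Dict.getD (PySem.Dict.mk tool) "result" ""
    pvEmptyRes result
  else false

-- `any(a and b and c for a, b, c in zip(flags, flags[1:], flags[2:]))`
def detect_search_thrashing_py_alt (transcript : List (List (String × List (String × String)))) : Bool :=
  let flags := transcript.map pvFlag
  (flags.zip ((PySem.List.slice flags (some 1) none).zip (PySem.List.slice flags (some 2) none))).any
    (fun p => p.1 && p.2.1 && p.2.2)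

-- ===== PRECONDITION & SPEC =====
def Spec_detect_search_thrashing_py (transcript : List (List (String × List (String × String)))) (out : Bool) : Prop := out = detect_search_thrashing_py_alt transcript
instance (transcript : List (List (String × List (String × String)))) (out : Bool) : Decidable (Spec_detect_search_thrashing_py transcript out) := by unfold Spec_detect_search_thrashing_py; infer_instance

-- ===== CLAIM (what is proved, stated in full; the proofs are below) =====
def Claim_equal_detect_search_thrashing_py : Prop := ∀ (transcript : List (List (String × List (String × String)))), Dom_detect_search_thrashing_py transcript → Spec_detect_search_thrashing_py transcript (detect_search_thrashing_py transcript)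

-- ===== LEMMAS AND PROOFS =====

-- "some window of three consecutive flags is all-true", in head recursion form
def pvWinP : List Bool → Bool
  | a :: b :: c :: r => (a && b && c) || pvWinP (b :: c :: r)
  | _ => false

-- A's loop, abstracted to the flag sequence
def pvLoopF : List Bool → Int → Bool
  | [], c => decide (c ≥ 3)
  | true :: r, c => pvLoopF r (c + 1)
  | false :: r, c => if c ≥ 3 then true else pvLoopF r 0

lemma pvDetectLoopA_eq_loopF (t : List (List (String × List (String × String)))) :
    ∀ c : Int, pvDetectLoopA t c = pvLoopF (t.map pvFlag) c := by
  induction t with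
  | nil => intro c; rfl
  | cons e rest ih =>
    intro c
    simp only [pvDetectLoopA, pvFlag, List.map_cons]
    by_cases h1 : (PySem.Dict.getD (PySem.Dict.mk (PySem.Dict.getD (PySem.Dict.mk e) "tool_use" [])) "name" "" == "Glob"
        || PySem.Dict.getD (PySem.Dict.mk (PySem.Dict.getD (PySem.Dict.mk e) "tool_use" [])) "name" "" == "Grep") = true
    · by_cases h2 : pvEmptyRes (PySem.Dict.getD (PySem.Dict.mk (PySem.Dict.getD (PySem.Dict.mk e) "tool_use" [])) "result" "") = true
      · simp [h1, h2, pvLoopF, ih]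
      · simp only [h1, if_true, h2, Bool.not_eq_true] at *
        simp [pvLoopF, ih]
    · simp only [Bool.not_eq_true] at h1
      simp [h1, pvLoopF, ih]

lemma pvWinP_false_cons (r : List Bool) : pvWinP (false :: r) = pvWinP r := by
  rcases r with _ | ⟨a, _ | ⟨b, r⟩⟩ <;> simp [pvWinP]

lemma pvWinP_tf (r : List Bool) : pvWinP (true :: false :: r) = pvWinP r := by
  rcases r with _ | ⟨a, _ | ⟨b, r⟩⟩ <;> simp [pvWinP]

lemma pvWinP_replicate (k : Nat) : pvWinP (List.replicate k true) = decide (3 ≤ k) := by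
  rcases k with _ | _ | _ | k <;> simp [List.replicate_succ, pvWinP]

lemma pvWinP_rep_false (k : Nat) (r : List Bool) :
    pvWinP (List.replicate k true ++ false :: r) = (decide (3 ≤ k) || pvWinP r) := by
  rcases k with _ | _ | _ | k <;>
    simp [List.replicate_succ, pvWinP, pvWinP_false_cons, pvWinP_tf]

lemma pvLoopF_eq_winP (f : List Bool) :
    ∀ k : Nat, pvLoopF f (k : Int) = pvWinP (List.replicate k true ++ f) := by
  induction f with
  | nil =>
    intro k
    simp only [List.append_nil, pvLoopF, pvWinP_replicate]
    have : ((k : Int) ≥ 3) ↔ (3 ≤ k) := by omega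
    simp [this]
  | cons a r ih =>
    intro k
    cases a with
    | true =>
      have h1 : (k : Int) + 1 = ((k + 1 : Nat) : Int) := by push_cast; ring
      have h2 : List.replicate (k + 1) true ++ r = List.replicate k true ++ true :: r := by
        rw [List.replicate_succ']
        simp
      simp only [pvLoopF, h1, ih (k + 1), h2]
    | false =>
      have h3 : ((k : Int) ≥ 3) ↔ (3 ≤ k) := by omega
      simp only [pvLoopF, pvWinP_rep_false, h3]
      by_cases h : 3 ≤ k
      · simp [h]
      · have := ih 0
        simp only [List.replicate, List.nil_append, Nat.cast_zero] at this
        simp [h, this]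

lemma pvAny_zip_eq_winP (f : List Bool) :
    ((f.zip ((f.drop 1).zip (f.drop 2))).any (fun p => p.1 && p.2.1 && p.2.2)) = pvWinP f := by
  induction f using pvWinP.induct with
  | case1 a b c r ih =>
    simp only [List.drop, List.zip_cons_cons, List.any_cons, pvWinP] at *
    rw [ih]
  | case2 f h =>
    rcases f with _ | ⟨a, _ | ⟨b, r⟩⟩
    · simp [pvWinP]
    · simp [pvWinP]
    · rcases r with _ | ⟨c, r⟩
      · simp [pvWinP]
      · exact absurd rfl (h a b c r)

lemma pvAlt_eq_winP (t : List (List (String × List (String × String)))) :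
    detect_search_thrashing_py_alt t = pvWinP (t.map pvFlag) := by
  show ((t.map pvFlag).zip ((PySem.List.slice (t.map pvFlag) (some 1) none).zip
      (PySem.List.slice (t.map pvFlag) (some 2) none))).any (fun p => p.1 && p.2.1 && p.2.2)
      = pvWinP (t.map pvFlag)
  rw [PySem.List.slice_from _ (by norm_num : (0 : Int) ≤ 1),
      PySem.List.slice_from _ (by norm_num : (0 : Int) ≤ 2),
      show ((1 : Int).toNat = 1) from rfl, show ((2 : Int).toNat = 2) from rfl]
  exact pvAny_zip_eq_winP _

-- ===== VERDICT (by name: the statement is the Claim_ definition above) =====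
theorem detect_search_thrashing_py_spec : Claim_equal_detect_search_thrashing_py := by
  intro t _
  unfold Spec_detect_search_thrashing_py detect_search_thrashing_py
  rw [pvDetectLoopA_eq_loopF, pvAlt_eq_winP]
  have := pvLoopF_eq_winP (t.map pvFlag) 0
  simpa using this
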